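-- pv_equiv track=rewrite | github.com/accelerate-data/migration-utility | plugin/lib/shared/batch_plan.py | _classify_phases
-- ===== SOURCE A (Python) =====
-- def _classify_phases(
--     all_objects: list[tuple[str, str]],
--     statuses: dict[str, str],
-- ) -> tuple[list[str], list[str], list[str], list[str], list[str]]:
--     """Sort objects into pipeline phases based on their status.
--
--     Returns (scope_phase, profile_phase, migrate_candidates, completed, n_a).
--     """
--     scope: list[str] = []
--     profile: list[str] = []
--     migrate: list[str] = []
--     completed: list[str] = []
--     n_a: list[str] = []
--
--     for fqn, _ in all_objects:
--         s = statuses[fqn]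
--         if s == "scope_needed":
--             scope.append(fqn)
--         elif s == "profile_needed":
--             profile.append(fqn)
--         elif s in ("test_gen_needed", "refactor_needed", "migrate_needed"):
--             migrate.append(fqn)
--         elif s == "complete":
--             completed.append(fqn)
--         elif s == "n_a":
--             n_a.append(fqn)
--
--     return scope, profile, migrate, completed, n_a
-- ===== SOURCE B (Python) =====
-- def _classify_phases(
--     all_objects: list[tuple[str, str]],
--     statuses: dict[str, str],
-- ) -> tuple[list[str], list[str], list[str], list[str], list[str]]:
--     scope = [fqn for fqn, _ in all_objects if statuses[fqn] == "scope_needed"]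
--     profile = [fqn for fqn, _ in all_objects if statuses[fqn] == "profile_needed"]
--     migrate = [
--         fqn
--         for fqn, _ in all_objects
--         if statuses[fqn] in ("test_gen_needed", "refactor_needed", "migrate_needed")
--     ]
--     completed = [fqn for fqn, _ in all_objects if statuses[fqn] == "complete"]
--     n_a = [fqn for fqn, _ in all_objects if statuses[fqn] == "n_a"]
--     return scope, profile, migrate, completed, n_a
-- ===== Notes on version B (the rewrite author's own statement) =====
-- stated objective: alternative
-- what changed: Replaces the single loop that dispatches each object into one of five accumulators with five independent filtering passes over all_objects, one comprehension per output bucket.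
import Mathlib
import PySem

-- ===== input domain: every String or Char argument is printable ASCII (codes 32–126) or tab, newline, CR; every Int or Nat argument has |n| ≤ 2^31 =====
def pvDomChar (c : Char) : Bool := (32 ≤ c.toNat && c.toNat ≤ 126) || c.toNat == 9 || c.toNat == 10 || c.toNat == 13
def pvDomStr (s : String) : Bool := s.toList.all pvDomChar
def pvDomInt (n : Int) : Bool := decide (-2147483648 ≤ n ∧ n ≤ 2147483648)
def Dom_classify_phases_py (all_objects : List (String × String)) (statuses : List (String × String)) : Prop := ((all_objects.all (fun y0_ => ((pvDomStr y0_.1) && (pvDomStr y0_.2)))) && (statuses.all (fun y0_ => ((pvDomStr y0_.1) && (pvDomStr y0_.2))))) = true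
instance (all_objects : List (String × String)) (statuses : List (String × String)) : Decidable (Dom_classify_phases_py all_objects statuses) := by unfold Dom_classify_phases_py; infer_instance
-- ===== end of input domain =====

-- B replaces A's single dispatch loop with five independent filtering passes, one per bucket (alternative decomposition, same cost).
-- Pre_ excludes inputs where some object's fqn is missing from statuses: there Python A raises KeyError (both programs do).


-- ===== PORT A =====
-- 's = statuses[fqn]': defined (Pre_) keys only; outside Pre_ Python raises KeyError, the port uses "" as a dummy.
def classify_phases_py (all_objects : List (String × String)) (statuses : List (String × String)) : List String × List String × List String × List String × List String :=
  all_objects.foldl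
    (fun (acc : List String × List String × List String × List String × List String) p =>
      let fqn := p.1
      let s := (PySem.Dict.mk statuses).getD fqn ""
      if s == "scope_needed" then (acc.1 ++ [fqn], acc.2.1, acc.2.2.1, acc.2.2.2.1, acc.2.2.2.2)
      else if s == "profile_needed" then (acc.1, acc.2.1 ++ [fqn], acc.2.2.1, acc.2.2.2.1, acc.2.2.2.2)
      else if s == "test_gen_needed" || s == "refactor_needed" || s == "migrate_needed" then (acc.1, acc.2.1, acc.2.2.1 ++ [fqn], acc.2.2.2.1, acc.2.2.2.2)
      else if s == "complete" then (acc.1, acc.2.1, acc.2.2.1, acc.2.2.2.1 ++ [fqn], acc.2.2.2.2)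
      else if s == "n_a" then (acc.1, acc.2.1, acc.2.2.1, acc.2.2.2.1, acc.2.2.2.2 ++ [fqn])
      else acc)
    ([], [], [], [], [])

-- ===== PORT B =====
def pvBStat (statuses : List (String × String)) (fqn : String) : String :=
  (PySem.Dict.mk statuses).getD fqn ""

def classify_phases_py_alt (all_objects : List (String × String)) (statuses : List (String × String)) : List String × List String × List String × List String × List String :=
  ( (all_objects.filter (fun p => pvBStat statuses p.1 == "scope_needed")).map Prod.fst
  , (all_objects.filter (fun p => pvBStat statuses p.1 == "profile_needed")).map Prod.fst
  , (all_objects.filter (fun p => pvBStat statuses p.1 == "test_gen_needed" || pvBStat statuses p.1 == "refactor_needed" || pvBStat statuses p.1 == "migrate_needed")).map Prod.fst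
  , (all_objects.filter (fun p => pvBStat statuses p.1 == "complete")).map Prod.fst
  , (all_objects.filter (fun p => pvBStat statuses p.1 == "n_a")).map Prod.fst )

-- ===== PRECONDITION & SPEC =====
-- Pre_: every object's fqn occurs as a key of statuses (otherwise Python A — and B — raises KeyError).
def Pre_classify_phases_py (all_objects : List (String × String)) (statuses : List (String × String)) : Prop :=
  ∀ p ∈ all_objects, (statuses.map Prod.fst).contains p.1 = true
instance (all_objects : List (String × String)) (statuses : List (String × String)) : Decidable (Pre_classify_phases_py all_objects statuses) := by unfold Pre_classify_phases_py; infer_instance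

def pvWitness_classify_phases_py : (List (String × String)) × (List (String × String)) :=
  ([("a", "obj"), ("b", "obj")], [("a", "scope_needed"), ("b", "complete"), ("c", "n_a")])

def Spec_classify_phases_py (all_objects : List (String × String)) (statuses : List (String × String)) (out : List String × List String × List String × List String × List String) : Prop := out = classify_phases_py_alt all_objects statuses
instance (all_objects : List (String × String)) (statuses : List (String × String)) (out : List String × List String × List String × List String × List String) : Decidable (Spec_classify_phases_py all_objects statuses out) := by unfold Spec_classify_phases_py; infer_instance

-- ===== CLAIM (what is proved, stated in full; the proofs are below) =====
def Claim_equal_classify_phases_py : Prop := ∀ (all_objects : List (String × String)) (statuses : List (String × String)), Dom_classify_phases_py all_objects statuses → Pre_classify_phases_py all_objects statuses → Spec_classify_phases_py all_objects statuses (classify_phases_py all_objects statuses)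

-- ===== LEMMAS AND PROOFS =====

-- The loop with arbitrary starting accumulators equals the five filters appended to those accumulators.
theorem classify_loop_eq (statuses : List (String × String)) (l : List (String × String))
    (a b c d e : List String) :
    l.foldl
      (fun (acc : List String × List String × List String × List String × List String) p =>
        let fqn := p.1
        let s := (PySem.Dict.mk statuses).getD fqn ""
        if s == "scope_needed" then (acc.1 ++ [fqn], acc.2.1, acc.2.2.1, acc.2.2.2.1, acc.2.2.2.2)
        else if s == "profile_needed" then (acc.1, acc.2.1 ++ [fqn], acc.2.2.1, acc.2.2.2.1, acc.2.2.2.2)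
        else if s == "test_gen_needed" || s == "refactor_needed" || s == "migrate_needed" then (acc.1, acc.2.1, acc.2.2.1 ++ [fqn], acc.2.2.2.1, acc.2.2.2.2)
        else if s == "complete" then (acc.1, acc.2.1, acc.2.2.1, acc.2.2.2.1 ++ [fqn], acc.2.2.2.2)
        else if s == "n_a" then (acc.1, acc.2.1, acc.2.2.1, acc.2.2.2.1, acc.2.2.2.2 ++ [fqn])
        else acc)
      (a, b, c, d, e)
    = ( a ++ (l.filter (fun p => pvBStat statuses p.1 == "scope_needed")).map Prod.fst
      , b ++ (l.filter (fun p => pvBStat statuses p.1 == "profile_needed")).map Prod.fst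
      , c ++ (l.filter (fun p => pvBStat statuses p.1 == "test_gen_needed" || pvBStat statuses p.1 == "refactor_needed" || pvBStat statuses p.1 == "migrate_needed")).map Prod.fst
      , d ++ (l.filter (fun p => pvBStat statuses p.1 == "complete")).map Prod.fst
      , e ++ (l.filter (fun p => pvBStat statuses p.1 == "n_a")).map Prod.fst ) := by
  induction l generalizing a b c d e with
  | nil => simp
  | cons hd tl ih =>
      rw [List.foldl_cons]
      simp only [List.filter_cons, pvBStat]
      split_ifs with h1 h2 h3 h4 h5 <;> rw [ih] <;> clear ih <;> simp_all [pvBStat]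

theorem classify_phases_py_eq_alt (all_objects statuses : List (String × String)) :
    classify_phases_py all_objects statuses = classify_phases_py_alt all_objects statuses := by
  unfold classify_phases_py classify_phases_py_alt
  simpa using classify_loop_eq statuses all_objects [] [] [] [] []

-- ===== VERDICT (by name: the statement is the Claim_ definition above) =====
theorem classify_phases_py_spec : Claim_equal_classify_phases_py := by
  intro ao st _ _
  exact classify_phases_py_eq_alt ao st
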